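-- pv_equiv track=rewrite | github.com/wulukewu/tech-news-agent | backend/app/qa_agent/response_generator.py | _prioritize_recommendations_by_interest
-- ===== SOURCE A (Python) =====
-- from typing import Dict, List, Optional
--
-- def _prioritize_recommendations_by_interest(
--     recommendations: List[str], priority_topics: List[str]
-- ) -> List[str]:
--     """
--     Prioritize recommendations based on user's interest topics.
--
--     Args:
--         recommendations: List of recommendation strings
--         priority_topics: Topics that match user's interests
--
--     Returns:
--         Reordered recommendations with user interests prioritized
--     """
--     if not priority_topics:
--         return recommendations
--
--     # Score recommendations based on topic matches
--     scored_recs = []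
--     for rec in recommendations:
--         score = 0
--         rec_lower = rec.lower()
--
--         # Higher score for recommendations mentioning user's priority topics
--         for topic in priority_topics:
--             if topic.lower() in rec_lower:
--                 score += 2
--
--         # Bonus for actionable language
--         if any(word in rec_lower for word in ["explore", "try", "implement", "learn", "study"]):
--             score += 1
--
--         scored_recs.append((score, rec))
--
--     # Sort by score (descending) and return recommendations
--     scored_recs.sort(key=lambda x: x[0], reverse=True)
--     return [rec for score, rec in scored_recs]
-- ===== SOURCE B (Python) =====
-- from typing import List
--
-- _ACTION_WORDS = ["explore", "try", "implement", "learn", "study"]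
--
--
-- def _score(rec: str, priority_topics: List[str]) -> int:
--     rec_lower = rec.lower()
--     score = 0
--     for topic in priority_topics:
--         if topic.lower() in rec_lower:
--             score += 2
--     if any(word in rec_lower for word in _ACTION_WORDS):
--         score += 1
--     return score
--
--
-- def _prioritize_recommendations_by_interest(
--     recommendations: List[str], priority_topics: List[str]
-- ) -> List[str]:
--     if not priority_topics:
--         return recommendations
--
--     # Bucket recommendations by score, keeping encounter order inside each bucket.
--     buckets = {}
--     for rec in recommendations:
--         s = _score(rec, priority_topics)
--         buckets.setdefault(s, []).append(rec)
--
--     # Emit buckets from highest score to lowest: matches a stable descending sort.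
--     out = []
--     for s in sorted(buckets, reverse=True):
--         out.extend(buckets[s])
--     return out
-- ===== Notes on version B (the rewrite author's own statement) =====
-- stated objective: alternative
-- what changed: Replaces the build-score-tuples-then-stable-comparison-sort with a bucket (counting) sort: recommendations are appended in encounter order to a dict keyed by score, and the output is the buckets concatenated in descending key order, which reproduces the stable reverse sort exactly.
import Mathlib
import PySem

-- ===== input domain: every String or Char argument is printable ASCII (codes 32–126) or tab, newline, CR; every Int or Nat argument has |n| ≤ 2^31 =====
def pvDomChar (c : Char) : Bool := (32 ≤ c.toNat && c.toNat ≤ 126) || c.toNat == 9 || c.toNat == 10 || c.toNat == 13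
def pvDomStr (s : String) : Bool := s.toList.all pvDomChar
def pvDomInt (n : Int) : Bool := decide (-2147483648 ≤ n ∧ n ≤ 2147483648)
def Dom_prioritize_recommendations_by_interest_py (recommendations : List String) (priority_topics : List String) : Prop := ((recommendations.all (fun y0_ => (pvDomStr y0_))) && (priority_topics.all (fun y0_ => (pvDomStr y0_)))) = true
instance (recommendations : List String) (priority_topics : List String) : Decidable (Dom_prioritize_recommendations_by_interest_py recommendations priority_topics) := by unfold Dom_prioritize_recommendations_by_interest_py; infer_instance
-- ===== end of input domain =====

-- B replaces A's build-tuples-then-stable-reverse-sort with a bucket (counting) sort over the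
-- integer score (buckets filled in encounter order, emitted in descending key order).

-- ===== PORT A =====
-- Score of one recommendation: +2 per lowercase topic contained in rec.lower(), +1 for an
-- actionable keyword.  A computes this inline in its loop; B's Python computes the identical
-- value in its helper `_score`, so both ports share this helper.
def pvScore (priority_topics : List String) (rec : String) : Int :=
  let recLower := PySem.Str.lower rec
  let score : Int :=
    priority_topics.foldl
      (fun s topic => if PySem.Str.isIn (PySem.Str.lower topic) recLower then s + 2 else s) 0
  if ["explore", "try", "implement", "learn", "study"].any
      (fun word => PySem.Str.isIn word recLower) then
    score + 1
  else score

def prioritize_recommendations_by_interest_py (recommendations : List String)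
    (priority_topics : List String) : List String :=
  if priority_topics = [] then recommendations
  else
    -- scored_recs built by appending (score, rec) for each rec
    let scored_recs : List (Int × String) :=
      recommendations.foldl (fun acc rec => acc ++ [(pvScore priority_topics rec, rec)]) []
    -- sort by score descending (stable), return the recommendations
    (PySem.List.sorted scored_recs (fun p => p.1) true).map (fun p => p.2)

-- ===== PORT B =====
def prioritize_recommendations_by_interest_py_alt (recommendations : List String)
    (priority_topics : List String) : List String :=
  if priority_topics = [] then recommendations
  else
    -- buckets.setdefault(s, []).append(rec)  ==  buckets[s] = buckets.get(s, []) + [rec]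
    let buckets : PySem.Dict Int (List String) :=
      recommendations.foldl
        (fun d rec => d.modify (pvScore priority_topics rec) [] (fun l => l ++ [rec]))
        PySem.Dict.empty
    -- for s in sorted(buckets, reverse=True): out.extend(buckets[s])
    -- (buckets[s] never raises: s is drawn from buckets' keys, so getD's default is unused)
    (PySem.List.sorted buckets.keys (fun k => k) true).foldl
      (fun out k => out ++ buckets.getD k []) []

-- ===== PRECONDITION & SPEC =====
def Spec_prioritize_recommendations_by_interest_py (recommendations : List String) (priority_topics : List String) (out : List String) : Prop := out = prioritize_recommendations_by_interest_py_alt recommendations priority_topics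
instance (recommendations : List String) (priority_topics : List String) (out : List String) : Decidable (Spec_prioritize_recommendations_by_interest_py recommendations priority_topics out) := by unfold Spec_prioritize_recommendations_by_interest_py; infer_instance

-- ===== CLAIM (what is proved, stated in full; the proofs are below) =====
def Claim_equal_prioritize_recommendations_by_interest_py : Prop := ∀ (recommendations : List String) (priority_topics : List String), Dom_prioritize_recommendations_by_interest_py recommendations priority_topics → Spec_prioritize_recommendations_by_interest_py recommendations priority_topics (prioritize_recommendations_by_interest_py recommendations priority_topics)

-- ===== LEMMAS AND PROOFS =====

-- Insert a key into a strictly descending list of keys (dropping duplicates).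
def pvInsDesc (v : Int) : List Int → List Int
  | [] => [v]
  | k :: ks => if k < v then v :: k :: ks else if v = k then k :: ks else k :: pvInsDesc v ks

-- The distinct keys of xs, in strictly descending order.
def pvKeysDesc (xs : List (Int × String)) : List Int :=
  xs.foldl (fun ks p => pvInsDesc p.1 ks) []

-- Concatenation of the key-groups of xs in the order given by ks.
def pvFlatten (ks : List Int) (xs : List (Int × String)) : List (Int × String) :=
  ks.flatMap (fun k => xs.filter (fun p => p.1 == k))

theorem pv_mem_insDesc (v w : Int) (ks : List Int) :
    w ∈ pvInsDesc v ks ↔ w = v ∨ w ∈ ks := by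
  induction ks with
  | nil => simp [pvInsDesc]
  | cons k ks ih =>
    simp only [pvInsDesc]
    split_ifs with h1 h2
    · simp [List.mem_cons]
    · subst h2; rw [List.mem_cons]; tauto
    · rw [List.mem_cons, List.mem_cons, ih]; tauto

theorem pv_pairwise_insDesc (v : Int) (ks : List Int)
    (h : ks.Pairwise (fun a b => b < a)) :
    (pvInsDesc v ks).Pairwise (fun a b => b < a) := by
  induction ks with
  | nil => simp [pvInsDesc]
  | cons k ks ih =>
    rcases List.pairwise_cons.mp h with ⟨hk, hks⟩
    simp only [pvInsDesc]
    split_ifs with h1 h2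
    · exact List.pairwise_cons.mpr ⟨by
        intro w hw
        rcases List.mem_cons.mp hw with rfl | hw
        · exact h1
        · exact lt_trans (hk w hw) h1, h⟩
    · exact h
    · refine List.pairwise_cons.mpr ⟨?_, ih hks⟩
      intro w hw
      rcases (pv_mem_insDesc v w ks).mp hw with rfl | hw
      · omega
      · exact hk w hw

theorem pv_mem_keysDesc_aux (xs : List (Int × String)) (acc : List Int) (w : Int) :
    w ∈ xs.foldl (fun ks p => pvInsDesc p.1 ks) acc ↔ w ∈ acc ∨ w ∈ xs.map Prod.fst := by
  induction xs generalizing acc with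
  | nil => simp
  | cons x xs ih =>
    simp only [List.foldl_cons, List.map_cons, List.mem_cons, ih, pv_mem_insDesc]
    tauto

theorem pv_mem_keysDesc (xs : List (Int × String)) (w : Int) :
    w ∈ pvKeysDesc xs ↔ w ∈ xs.map Prod.fst := by
  simpa using pv_mem_keysDesc_aux xs [] w

theorem pv_pairwise_keysDesc_aux (xs : List (Int × String)) (acc : List Int)
    (h : acc.Pairwise (fun a b => b < a)) :
    (xs.foldl (fun ks p => pvInsDesc p.1 ks) acc).Pairwise (fun a b => b < a) := by
  induction xs generalizing acc with
  | nil => exact h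
  | cons x xs ih => exact ih _ (pv_pairwise_insDesc _ _ h)

theorem pv_pairwise_keysDesc (xs : List (Int × String)) :
    (pvKeysDesc xs).Pairwise (fun a b => b < a) :=
  pv_pairwise_keysDesc_aux xs [] (by simp)

theorem pv_nodup_keysDesc (xs : List (Int × String)) : (pvKeysDesc xs).Nodup :=
  (pv_pairwise_keysDesc xs).imp (fun h => by omega)

theorem pv_insertBy_skip (bef : (Int × String) → (Int × String) → Bool)
    (x : Int × String) (as bs : List (Int × String))
    (h : ∀ y ∈ as, bef x y = false) :
    PySem.List.insertBy bef x (as ++ bs) = as ++ PySem.List.insertBy bef x bs := by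
  induction as with
  | nil => simp
  | cons a as ih =>
    have ha : bef x a = false := h a (by simp)
    simp [PySem.List.insertBy, ha, ih (fun y hy => h y (by simp [hy]))]

theorem pv_insertBy_front (bef : (Int × String) → (Int × String) → Bool)
    (x : Int × String) (l : List (Int × String))
    (h : ∀ y ∈ l, bef x y = true) :
    PySem.List.insertBy bef x l = x :: l := by
  cases l with
  | nil => simp [PySem.List.insertBy]
  | cons a l => simp [PySem.List.insertBy, h a (by simp)]

theorem pvFlatten_cons (k : Int) (ks : List Int) (xs : List (Int × String)) :
    pvFlatten (k :: ks) xs = xs.filter (fun p => p.1 == k) ++ pvFlatten ks xs := by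
  simp [pvFlatten]

theorem pv_mem_flatten (ks : List Int) (xs : List (Int × String)) (y : Int × String)
    (h : y ∈ pvFlatten ks xs) : y.1 ∈ ks := by
  rcases List.mem_flatMap.mp h with ⟨k, hk, hy⟩
  rcases List.mem_filter.mp hy with ⟨_, hyk⟩
  have : y.1 = k := by simpa using hyk
  simpa [this] using hk

-- Inserting x into the flattened groups appends x to its own group (creating it at the
-- right descending position when absent).
theorem pv_insert_flatten (ks : List Int) (xs : List (Int × String)) (x : Int × String)
    (hpw : ks.Pairwise (fun a b => b < a))
    (hcov : x.1 ∈ xs.map Prod.fst → x.1 ∈ ks) :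
    PySem.List.insertBy (fun a b => decide (b.1 < a.1)) x (pvFlatten ks xs)
      = pvFlatten (pvInsDesc x.1 ks) (xs ++ [x]) := by
  induction ks with
  | nil =>
    have hfil : xs.filter (fun p => p.1 == x.1) = [] := by
      rw [List.filter_eq_nil_iff]
      intro p hp hpx
      exact absurd (hcov (by
        have : p.1 = x.1 := by simpa using hpx
        exact this ▸ List.mem_map_of_mem hp)) (by simp)
    simp [pvFlatten, pvInsDesc, PySem.List.insertBy, List.filter_append, hfil]
  | cons k ks ih =>
    rcases List.pairwise_cons.mp hpw with ⟨hk, hks⟩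
    simp only [pvInsDesc]
    split_ifs with h1 h2
    · -- k < x.1 : x's key is new and greater than everything present
      have hfront : ∀ y ∈ pvFlatten (k :: ks) xs,
          (fun a b : Int × String => decide (b.1 < a.1)) x y = true := by
        intro y hy
        have hyk : y.1 ∈ k :: ks := pv_mem_flatten _ _ _ hy
        rcases List.mem_cons.mp hyk with hek | hmem
        · simp [hek]; omega
        · have := hk _ hmem; simp; omega
      have hfil : xs.filter (fun p => p.1 == x.1) = [] := by
        rw [List.filter_eq_nil_iff]
        intro p hp hpx
        have hpx' : p.1 = x.1 := by simpa using hpx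
        have hx1 : x.1 ∈ k :: ks := hcov (hpx' ▸ List.mem_map_of_mem hp)
        rcases List.mem_cons.mp hx1 with hek | hmem
        · omega
        · have := hk _ hmem; omega
      have hne : ∀ j ∈ k :: ks, (xs ++ [x]).filter (fun p => p.1 == j)
          = xs.filter (fun p => p.1 == j) := by
        intro j hj
        have hxj : ¬ (x.1 = j) := by
          rcases List.mem_cons.mp hj with rfl | hmem
          · omega
          · have := hk _ hmem; omega
        simp [List.filter_append, hxj]
      rw [pv_insertBy_front _ _ _ hfront]
      simp only [pvFlatten, List.flatMap_cons]
      rw [List.filter_append]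
      simp only [show (x.1 == x.1) = true by simp, List.filter_cons]
      rw [hfil, hne k (by simp)]
      have : (ks.flatMap fun j => (xs ++ [x]).filter (fun p => p.1 == j))
          = ks.flatMap fun j => xs.filter (fun p => p.1 == j) := by
        apply List.flatMap_congr
        intro j hj
        exact hne j (by simp [hj])
      simp_all [pvFlatten]
    · -- x.1 = k : x joins the existing first group
      subst h2
      have hskip : ∀ y ∈ xs.filter (fun p => p.1 == x.1),
          (fun a b : Int × String => decide (b.1 < a.1)) x y = false := by
        intro y hy
        have : y.1 = x.1 := by simpa using (List.mem_filter.mp hy).2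
        simp [this]
      have hfront : ∀ y ∈ pvFlatten ks xs,
          (fun a b : Int × String => decide (b.1 < a.1)) x y = true := by
        intro y hy
        have hmem := pv_mem_flatten _ _ _ hy
        have := hk _ hmem; simp; omega
      have hne : ∀ j ∈ ks, (xs ++ [x]).filter (fun p => p.1 == j)
          = xs.filter (fun p => p.1 == j) := by
        intro j hj
        have := hk _ hj
        have hxj : ¬ (x.1 = j) := by omega
        simp [List.filter_append, hxj]
      simp only [pvFlatten, List.flatMap_cons]
      rw [pv_insertBy_skip _ _ _ _ hskip, pv_insertBy_front _ _ _ hfront]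
      rw [List.filter_append]
      simp only [show (x.1 == x.1) = true by simp, List.filter_cons]
      have : (ks.flatMap fun j => (xs ++ [x]).filter (fun p => p.1 == j))
          = ks.flatMap fun j => xs.filter (fun p => p.1 == j) := by
        apply List.flatMap_congr
        intro j hj
        exact hne j hj
      simp_all [pvFlatten]
    · -- x.1 < k : skip the first group, recurse
      have hxk : x.1 < k := by omega
      have hskip : ∀ y ∈ xs.filter (fun p => p.1 == k),
          (fun a b : Int × String => decide (b.1 < a.1)) x y = false := by
        intro y hy
        have : y.1 = k := by simpa using (List.mem_filter.mp hy).2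
        simp [this]; omega
      have hcov' : x.1 ∈ xs.map Prod.fst → x.1 ∈ ks := by
        intro hm
        rcases List.mem_cons.mp (hcov hm) with hek | hmem
        · omega
        · exact hmem
      rw [pvFlatten_cons, pv_insertBy_skip _ _ _ _ hskip, ih hks hcov', pvFlatten_cons]
      have hnk : (xs ++ [x]).filter (fun p => p.1 == k) = xs.filter (fun p => p.1 == k) := by
        have hxj : ¬ (x.1 = k) := by omega
        simp [List.filter_append, hxj]
      rw [hnk]

theorem pv_keysDesc_append (xs : List (Int × String)) (x : Int × String) :
    pvKeysDesc (xs ++ [x]) = pvInsDesc x.1 (pvKeysDesc xs) := by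
  simp [pvKeysDesc, List.foldl_append]

-- The stable reverse sort by score is exactly the groups in descending key order.
theorem pv_sorted_eq_flatten (xs : List (Int × String)) :
    PySem.List.sorted xs (fun p => p.1) true = pvFlatten (pvKeysDesc xs) xs := by
  induction xs using List.reverseRecOn with
  | nil =>
    rw [PySem.List.sorted_rev_eq_foldl_insertBy]
    simp [pvKeysDesc, pvFlatten]
  | append_singleton xs x ih =>
    rw [PySem.List.sorted_rev_eq_foldl_insertBy] at ih ⊢
    rw [List.foldl_append, List.foldl_cons, List.foldl_nil, ih,
      pv_insert_flatten _ _ _ (pv_pairwise_keysDesc xs)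
        (fun hm => (pv_mem_keysDesc xs x.1).mpr hm),
      pv_keysDesc_append]

-- A's loop building scored_recs is the map.
theorem pv_foldl_append_map (recs : List String) (f : String → Int × String) :
    recs.foldl (fun acc rec => acc ++ [f rec]) [] = recs.map f := by
  rw [PySem.List.foldl_append_eq_flatMap (fun rec => [f rec]) recs [], List.nil_append]
  induction recs with
  | nil => rfl
  | cons r recs ih => simp only [List.flatMap_cons, List.map_cons, List.singleton_append, ih]

-- ===== VERDICT (by name: the statement is the Claim_ definition above) =====
theorem prioritize_recommendations_by_interest_py_spec : Claim_equal_prioritize_recommendations_by_interest_py := by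
  intro recommendations priority_topics _
  unfold Spec_prioritize_recommendations_by_interest_py
  unfold prioritize_recommendations_by_interest_py prioritize_recommendations_by_interest_py_alt
  by_cases hpt : priority_topics = []
  · simp [hpt]
  · simp only [hpt, if_false]
    set f : String → Int × String := fun rec => (pvScore priority_topics rec, rec) with hf
    set scored := recommendations.map f with hscored
    -- B's dict: rewrite the fold over recommendations as a fold over scored pairs
    have hfold : (recommendations.foldl
        (fun d rec => d.modify (pvScore priority_topics rec) [] (fun l => l ++ [rec]))
        PySem.Dict.empty)
        = scored.foldl (fun d p => d.modify p.1 [] (fun l => l ++ [p.2])) PySem.Dict.empty := by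
      rw [hscored, List.foldl_map]
    have hgetD : ∀ c, (scored.foldl (fun d p => d.modify p.1 [] (fun l => l ++ [p.2]))
        PySem.Dict.empty).getD c []
        = (scored.filter (fun p => p.1 == c)).map (fun p => p.2) := by
      intro c
      rw [PySem.Dict.getD_foldl_modify_append]
      simp
    have hkeys : (scored.foldl (fun d p => d.modify p.1 [] (fun l => l ++ [p.2]))
        PySem.Dict.empty).keys = PySem.Set.ofList (scored.map Prod.fst) := by
      have := PySem.Dict.keys_foldl_modify_key scored (fun p => p.1) []
        (fun _ p => fun l => l ++ [p.2]) PySem.Dict.empty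
      simpa [PySem.Set.update_nil_left] using this
    -- the sorted distinct keys are pvKeysDesc scored
    have hperm : (pvKeysDesc scored).Perm (PySem.Set.ofList (scored.map Prod.fst)) := by
      rw [List.perm_ext_iff_of_nodup (pv_nodup_keysDesc scored) (PySem.Set.nodup_ofList _)]
      intro a
      rw [pv_mem_keysDesc, PySem.Set.mem_ofList]
    have hsortk : PySem.List.sorted (PySem.Set.ofList (scored.map Prod.fst))
        (fun k => k) true = pvKeysDesc scored :=
      PySem.List.sorted_rev_eq_of_perm_of_pairwise_gt _ _ _ hperm
        (by simpa using pv_pairwise_keysDesc scored)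
    rw [pv_foldl_append_map, ← hscored, pv_sorted_eq_flatten, hfold, hkeys, hsortk,
      PySem.List.foldl_append_eq_flatMap]
    simp only [List.nil_append, pvFlatten, List.map_flatMap]
    exact List.flatMap_congr (fun k _ => (hgetD k).symm)
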